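-- pv_equiv track=rewrite | github.com/KAI-YIP/nlp | 20140715/vsm-svd.py | f_vector_found
-- ===== SOURCE A (Python) =====
-- def f_vector_found(txt):
-- 	"""calculate all of the word in the document set---构造词空间"""
-- 	word_list=[]
-- 	for line in txt:
-- 		line_clean=line.split()
-- 		for word in line_clean:
-- 			if word not in word_list:
-- 				word_list.append(word)
-- 			else:
-- 				pass
-- 	return word_list
-- ===== SOURCE B (Python) =====
-- def f_vector_found(txt):
-- 	"""calculate all of the word in the document set---构造词空间"""
-- 	words = [w for line in txt for w in line.split()]
-- 	first = {}
-- 	for i, w in enumerate(words):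
-- 		first.setdefault(w, i)
-- 	return sorted(first, key=first.get)
-- ===== Notes on version B (the rewrite author's own statement) =====
-- stated objective: faster
-- what changed: B builds a first-occurrence-index table over the flattened word stream in one pass and then SORTS the table's keys by that index, instead of A's per-word linear membership rescan of the growing result list; correctness rests on first-occurrence indices being strictly increasing in insertion order.
import Mathlib
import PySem

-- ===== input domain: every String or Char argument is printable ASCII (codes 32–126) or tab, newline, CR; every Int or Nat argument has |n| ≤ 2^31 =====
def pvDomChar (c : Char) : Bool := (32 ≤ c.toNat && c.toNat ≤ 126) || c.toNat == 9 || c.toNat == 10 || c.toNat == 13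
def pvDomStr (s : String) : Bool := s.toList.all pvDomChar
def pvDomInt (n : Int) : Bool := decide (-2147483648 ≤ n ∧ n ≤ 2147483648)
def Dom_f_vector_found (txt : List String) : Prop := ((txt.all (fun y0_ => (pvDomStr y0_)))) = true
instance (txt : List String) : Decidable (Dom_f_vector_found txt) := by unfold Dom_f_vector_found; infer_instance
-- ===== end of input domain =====

-- B builds a first-occurrence-index table over the flattened word stream in one pass and sorts the
-- keys by that index, instead of A's per-word membership rescan of the growing result list (alternative algorithm).
-- ===== PORT A =====
def f_vector_found (txt : List String) : List String :=
  txt.foldl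
    (fun word_list line =>
      (PySem.Str.split₀ line).foldl
        (fun word_list word =>
          if ¬ word_list.contains word then word_list ++ [word] else word_list)
        word_list)
    []

-- ===== PORT B =====
def f_vector_found_alt (txt : List String) : List String :=
  let words := txt.flatMap (fun line => PySem.Str.split₀ line)
  let first := (PySem.List.enumerate words).foldl
      (fun d p => d.setdefault p.2 p.1) (PySem.Dict.empty : PySem.Dict String Int)
  PySem.List.sorted first.keys (fun k => first.getD k 0)

-- ===== PRECONDITION & SPEC =====
def Spec_f_vector_found (txt : List String) (out : List String) : Prop := out = f_vector_found_alt txt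
instance (txt : List String) (out : List String) : Decidable (Spec_f_vector_found txt out) := by unfold Spec_f_vector_found; infer_instance

-- ===== CLAIM (what is proved, stated in full; the proofs are below) =====
def Claim_equal_f_vector_found : Prop := ∀ (txt : List String), Dom_f_vector_found txt → Spec_f_vector_found txt (f_vector_found txt)

-- ===== LEMMAS AND PROOFS =====

-- A's inner step is exactly PySem.Set.add (with the branches stated the other way round).
theorem step_eq_add : (fun (wl : List String) (w : String) =>
    if ¬ wl.contains w then wl ++ [w] else wl) = PySem.Set.add := by
  funext wl w
  by_cases h : w ∈ wl <;> simp [PySem.Set.add, h]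

-- A's nested loop over lines/words is the fold of its step over the flattened word list.
theorem nested_foldl (txt : List String) (init : List String) :
    txt.foldl
      (fun word_list line =>
        (PySem.Str.split₀ line).foldl
          (fun word_list word =>
            if ¬ word_list.contains word then word_list ++ [word] else word_list)
          word_list)
      init
    = (txt.flatMap (fun line => PySem.Str.split₀ line)).foldl
        (fun word_list word =>
          if ¬ word_list.contains word then word_list ++ [word] else word_list)
        init := by
  induction txt generalizing init with
  | nil => rfl
  | cons l ls ih => rw [List.foldl_cons, ih, List.flatMap_cons, List.foldl_append]

-- Invariant of B's table-building pass: starting from a dict with nodup keys, value-increasing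
-- items all bounded by the next index, the setdefault-fold keeps those properties and its keys
-- evolve exactly as A's membership-scan accumulator (PySem.Set.add) does over the word stream.
theorem fold_setdefault_inv (ws : List String) :
    ∀ (i : Int) (d : PySem.Dict String Int),
      d.keys.Nodup →
      d.items.Pairwise (fun p q => p.2 < q.2) →
      (∀ p ∈ d.items, p.2 < i) →
      ((PySem.List.enumerate ws i).foldl (fun d p => d.setdefault p.2 p.1) d).keys
          = ws.foldl PySem.Set.add d.keys ∧
      ((PySem.List.enumerate ws i).foldl (fun d p => d.setdefault p.2 p.1) d).keys.Nodup ∧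
      ((PySem.List.enumerate ws i).foldl (fun d p => d.setdefault p.2 p.1) d).items.Pairwise
          (fun p q => p.2 < q.2) := by
  induction ws with
  | nil => intro i d h1 h2 _; exact ⟨rfl, h1, h2⟩
  | cons w ws ih =>
    intro i d h1 h2 h3
    rw [PySem.List.enumerate_cons, List.foldl_cons, List.foldl_cons]
    by_cases hc : d.contains w = true
    · have hstep : d.setdefault w i = d := PySem.Dict.setdefault_of_contains d i hc
      have hmem : w ∈ d.keys := (PySem.Dict.contains_iff_mem_keys d w).mp hc
      have hadd : PySem.Set.add d.keys w = d.keys := by simp [PySem.Set.add, hmem]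
      rw [hstep, hadd]
      exact ih (i + 1) d h1 h2 (fun p hp => lt_trans (h3 p hp) (by omega))
    · have hc' : d.contains w = false := by simpa using hc
      have hstep : d.setdefault w i = d.insert w i :=
        PySem.Dict.setdefault_of_not_contains d i hc'
      have hkeys : (d.insert w i).keys = d.keys ++ [w] :=
        PySem.Dict.keys_insert_of_not_contains d i hc'
      have hitems : (d.insert w i).items = d.items ++ [(w, i)] :=
        PySem.Dict.items_insert_of_not_contains d i hc'
      have hmem : w ∉ d.keys := fun h => hc ((PySem.Dict.contains_iff_mem_keys d w).mpr h)
      have hadd : PySem.Set.add d.keys w = d.keys ++ [w] := by simp [PySem.Set.add, hmem]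
      rw [hstep, hadd, ← hkeys]
      refine ih (i + 1) (d.insert w i) (PySem.Dict.nodup_keys_insert d w i h1) ?_ ?_
      · rw [hitems, List.pairwise_append]
        exact ⟨h2, List.pairwise_singleton _ _, fun p hp q hq => by
          simp at hq; rw [hq]; exact h3 p hp⟩
      · intro p hp
        rw [hitems] at hp
        rcases List.mem_append.mp hp with h | h
        · exact lt_trans (h3 p h) (by omega)
        · simp at h; rw [h]; omega

-- ===== VERDICT (by name: the statement is the Claim_ definition above) =====
theorem f_vector_found_spec : Claim_equal_f_vector_found := by
  intro txt _
  unfold Spec_f_vector_found f_vector_found f_vector_found_alt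
  rw [nested_foldl, step_eq_add]
  set words := txt.flatMap (fun line => PySem.Str.split₀ line) with hw
  obtain ⟨hkeys, hnodup, hpair⟩ :=
    fold_setdefault_inv words 0 PySem.Dict.empty
      (by simp [PySem.Dict.empty, PySem.Dict.keys])
      (by simp [PySem.Dict.empty])
      (by simp [PySem.Dict.empty])
  set first := (PySem.List.enumerate words).foldl
      (fun d p => d.setdefault p.2 p.1) (PySem.Dict.empty : PySem.Dict String Int) with hf
  have hkeys' : first.keys = words.foldl PySem.Set.add [] := by
    simpa [PySem.Dict.empty, PySem.Dict.keys] using hkeys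
  have hkp : first.keys.Pairwise (fun a b => first.getD a 0 < first.getD b 0) := by
    have : first.keys = first.items.map Prod.fst := rfl
    rw [this, List.pairwise_map]
    refine hpair.imp_of_mem ?_
    intro p q hp hq hlt
    have hpm : (p.1, p.2) ∈ first.items := by simpa using hp
    have hqm : (q.1, q.2) ∈ first.items := by simpa using hq
    rw [PySem.Dict.getD_of_mem_items first hpm hnodup 0,
        PySem.Dict.getD_of_mem_items first hqm hnodup 0]
    exact hlt
  rw [PySem.List.sorted_eq_of_perm_of_pairwise_lt first.keys first.keys _ (List.Perm.refl _) hkp]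
  exact hkeys'.symm
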